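-- pv_equiv track=rewrite | github.com/mgershovitz/maya_solves | bit_manipulation/get_all_powers_of_two.py | get_all_powers_of_two
-- ===== SOURCE A (Python) =====
-- def get_all_powers_of_two(x):
--     res = []
--     power_of_two = 1
--     while power_of_two <= x:
--         if power_of_two & x != 0:
--             res.append(power_of_two)
--         power_of_two = power_of_two << 1
--     return res
-- ===== SOURCE B (Python) =====
-- def get_all_powers_of_two(x):
--     res = []
--     while x > 0:
--         low = x & -x          # lowest set bit, extracted directly
--         res.append(low)
--         x ^= low              # clear that bit
--     return res
-- ===== Notes on version B (the rewrite author's own statement) =====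
-- stated objective: idiomatic
-- what changed: Replaces A's scan over every power of two up to x (testing each position with a masked conditional) by direct lowest-set-bit extraction (low = x & -x, then x ^= low), so the loop visits only the set bits and has no per-position branch.
import Mathlib
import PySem

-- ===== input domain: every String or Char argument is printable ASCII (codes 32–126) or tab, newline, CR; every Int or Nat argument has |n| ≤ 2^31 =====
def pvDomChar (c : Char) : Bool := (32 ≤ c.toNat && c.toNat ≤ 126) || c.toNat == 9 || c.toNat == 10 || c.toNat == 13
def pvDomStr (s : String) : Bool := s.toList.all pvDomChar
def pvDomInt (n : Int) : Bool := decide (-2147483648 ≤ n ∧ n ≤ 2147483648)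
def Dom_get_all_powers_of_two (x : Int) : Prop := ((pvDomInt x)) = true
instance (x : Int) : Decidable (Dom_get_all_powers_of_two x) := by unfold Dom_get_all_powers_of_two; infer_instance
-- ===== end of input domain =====

-- B replaces A's scan over every power of two up to x by direct lowest-set-bit extraction (low = x & -x; x ^= low); same return value on all ints.

-- Bit lemmas cited (via pvB_step) by port B's `decreasing_by`; they are also reused by the equivalence proof below.
theorem pv_sub_one (t m : Nat) : 2 ^ t * (2 * m + 1) - 1 = 2 ^ t * (2 * m) + (2 ^ t - 1) := by
  have h : 2 ^ t * (2 * m + 1) = 2 ^ t * (2 * m) + 2 ^ t := by ring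
  have h1 : 0 < 2 ^ t := Nat.two_pow_pos t
  omega

theorem pv_ldiff (t m : Nat) :
    Nat.ldiff (2 ^ t * (2 * m + 1)) (2 ^ t * (2 * m + 1) - 1) = 2 ^ t := by
  have h1 : 0 < 2 ^ t := Nat.two_pow_pos t
  apply Nat.eq_of_testBit_eq
  intro j
  rw [pv_sub_one, Nat.testBit_ldiff, Nat.testBit_two_pow_mul,
      Nat.testBit_two_pow_mul_add _ (by omega), Nat.testBit_two_pow]
  rcases Nat.lt_trichotomy j t with hj | hj | hj
  · simp [hj, Nat.not_le.mpr hj]; omega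
  · subst hj
    rw [if_neg (by omega)]
    simp [Nat.testBit_zero]
  · obtain ⟨k, hk⟩ : ∃ k, j - t = k + 1 := ⟨j - t - 1, by omega⟩
    rw [if_neg (by omega), hk, Nat.testBit_add_one, Nat.testBit_add_one]
    have e1 : (2 * m + 1) / 2 = m := by omega
    have e2 : (2 * m) / 2 = m := by omega
    rw [e1, e2]
    simp [show t ≠ j by omega, show t ≤ j by omega]

theorem pv_xor (t m : Nat) : (2 ^ t * (2 * m + 1)) ^^^ 2 ^ t = 2 ^ t * (2 * m) := by
  apply Nat.eq_of_testBit_eq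
  intro j
  rw [Nat.testBit_xor, Nat.testBit_two_pow_mul, Nat.testBit_two_pow_mul, Nat.testBit_two_pow]
  rcases Nat.lt_trichotomy j t with hj | hj | hj
  · simp [Nat.not_le.mpr hj]; omega
  · subst hj
    simp [Nat.testBit_zero]
  · obtain ⟨k, hk⟩ : ∃ k, j - t = k + 1 := ⟨j - t - 1, by omega⟩
    rw [hk, Nat.testBit_add_one, Nat.testBit_add_one]
    have e1 : (2 * m + 1) / 2 = m := by omega
    have e2 : (2 * m) / 2 = m := by omega
    rw [e1, e2]
    simp [show t ≠ j by omega, show t ≤ j by omega]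

theorem pvB_stepN (n : Nat) (hn : 0 < n) : n ^^^ Nat.ldiff n (n - 1) < n := by
  obtain ⟨t, m', hm, heq⟩ := Nat.exists_eq_two_pow_mul_odd (n := n) (by omega)
  obtain ⟨m, rfl⟩ := hm
  subst heq
  rw [pv_ldiff, pv_xor]
  have h1 : 0 < 2 ^ t := Nat.two_pow_pos t
  have : 2 ^ t * (2 * m) < 2 ^ t * (2 * m + 1) := by
    gcongr
    omega
  exact this

theorem pvB_step (x : Int) (hx : 0 < x) : (Int.xor x (Int.land x (-x))).toNat < x.toNat := by
  cases x with
  | negSucc n => simp at hx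
  | ofNat n =>
    match n, hx with
    | (k+1), _ =>
      have hland : Int.land (Int.ofNat (k+1)) (-(Int.ofNat (k+1))) = Int.ofNat (Nat.ldiff (k+1) k) := rfl
      have hxor : Int.xor (Int.ofNat (k+1)) (Int.ofNat (Nat.ldiff (k+1) k)) = Int.ofNat ((k+1) ^^^ Nat.ldiff (k+1) k) := rfl
      rw [hland, hxor]
      have : (Int.ofNat ((k+1) ^^^ Nat.ldiff (k+1) k)).toNat = (k+1) ^^^ Nat.ldiff (k+1) k := rfl
      rw [this]
      have h2 : (Int.ofNat (k+1)).toNat = k+1 := rfl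
      rw [h2]
      exact pvB_stepN (k+1) (by omega)

-- ===== PORT A =====
-- A's while-loop; `power_of_two << 1` is ported by hand as `p * 2` (exact: left shift by 1 is doubling on Python ints)
def pvA_loop (x p : Int) (hp : 0 < p) : List Int :=
  if h : p ≤ x then
    (if Int.land p x ≠ 0 then [p] else []) ++ pvA_loop x (p * 2) (by omega)
  else []
termination_by (x + 1 - p).toNat
decreasing_by omega

def get_all_powers_of_two (x : Int) : List Int := pvA_loop x 1 (by omega)

-- ===== PORT B =====
-- B's while-loop: while x > 0: low = x & -x; res.append(low); x ^= low
def pvB_loop (x : Int) : List Int :=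
  if h : 0 < x then
    Int.land x (-x) :: pvB_loop (Int.xor x (Int.land x (-x)))
  else []
termination_by x.toNat
decreasing_by exact pvB_step x h

def get_all_powers_of_two_alt (x : Int) : List Int := pvB_loop x

-- ===== PRECONDITION & SPEC =====
def Spec_get_all_powers_of_two (x : Int) (out : List Int) : Prop := out = get_all_powers_of_two_alt x
instance (x : Int) (out : List Int) : Decidable (Spec_get_all_powers_of_two x out) := by unfold Spec_get_all_powers_of_two; infer_instance

-- ===== CLAIM (what is proved, stated in full; the proofs are below) =====
def Claim_equal_get_all_powers_of_two : Prop := ∀ (x : Int), Dom_get_all_powers_of_two x → Spec_get_all_powers_of_two x (get_all_powers_of_two x)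

-- ===== LEMMAS AND PROOFS =====

-- Nat mirror of A's loop, indexed by the exponent
def pvAN (n j : Nat) : List Nat :=
  if h : 2 ^ j ≤ n then
    (if n.testBit j then [2 ^ j] else []) ++ pvAN n (j + 1)
  else []
termination_by n + 1 - 2 ^ j
decreasing_by
  have h1 : 0 < 2 ^ j := Nat.two_pow_pos j
  omega

-- Nat mirror of B's loop
def pvBN (n : Nat) : List Nat :=
  if h : 0 < n then
    Nat.ldiff n (n - 1) :: pvBN (n ^^^ Nat.ldiff n (n - 1))
  else []
termination_by n
decreasing_by exact pvB_stepN n h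

theorem pv_bridgeA (fuel : Nat) : ∀ (n j : Nat) (p x : Int) (hp : 0 < p),
    n + 1 - 2 ^ j ≤ fuel → p = ((2 ^ j : Nat) : Int) → x = (n : Int) →
    pvA_loop x p hp = (pvAN n j).map (fun k => (k : Int)) := by
  induction fuel with
  | zero =>
    intro n j p x hp hf hpj hx
    subst hpj hx
    have hg : ¬ (2 ^ j ≤ n) := by have := Nat.two_pow_pos j; omega
    rw [pvA_loop, pvAN, dif_neg (by exact_mod_cast hg), dif_neg hg]
    rfl
  | succ f ih =>
    intro n j p x hp hf hpj hx
    subst hpj hx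
    rw [pvA_loop, pvAN]
    by_cases hg : 2 ^ j ≤ n
    · rw [dif_pos (by exact_mod_cast hg), dif_pos hg]
      have hland : Int.land ((2 ^ j : Nat) : Int) ((n : Nat) : Int) = (((2 ^ j &&& n : Nat)) : Int) := rfl
      have hcond : (Int.land ((2 ^ j : Nat) : Int) ((n : Nat) : Int) ≠ 0) ↔ n.testBit j := by
        rw [hland]
        rw [Int.natCast_ne_zero, Nat.land_comm, Nat.and_two_pow]
        have := Nat.two_pow_pos j
        cases hb : n.testBit j
        · simp
        · simp
      have hrec : pvA_loop ((n : Nat) : Int) (((2 ^ j : Nat) : Int) * 2) (by positivity) =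
          (pvAN n (j + 1)).map (fun k => (k : Int)) := by
        apply ih
        · have h1 : 0 < 2 ^ j := Nat.two_pow_pos j
          have h2 : 2 ^ (j + 1) = 2 * 2 ^ j := by ring
          omega
        · push_cast [pow_succ]; ring
        · rfl
      rw [hrec]
      by_cases hb : n.testBit j
      · rw [if_pos (hcond.mpr hb), if_pos hb]
        simp
      · rw [if_neg (fun hc => hb (hcond.mp hc)), if_neg hb]
        simp
    · rw [dif_neg (by exact_mod_cast hg), dif_neg hg]
      rfl

theorem pv_bridgeB (fuel : Nat) : ∀ (n : Nat), n ≤ fuel →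
    pvB_loop ((n : Nat) : Int) = (pvBN n).map (fun k => (k : Int)) := by
  induction fuel with
  | zero =>
    intro n hf
    have : n = 0 := by omega
    subst this
    rw [pvB_loop, pvBN]
    norm_num
  | succ f ih =>
    intro n hf
    rw [pvB_loop, pvBN]
    by_cases hn : 0 < n
    · rw [dif_pos (by exact_mod_cast hn), dif_pos hn]
      obtain ⟨k, rfl⟩ : ∃ k, n = k + 1 := ⟨n - 1, by omega⟩
      have hland : Int.land ((k + 1 : Nat) : Int) (-((k + 1 : Nat) : Int)) =
          ((Nat.ldiff (k + 1) ((k + 1) - 1) : Nat) : Int) := rfl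
      have hxor : Int.xor ((k + 1 : Nat) : Int) ((Nat.ldiff (k + 1) ((k + 1) - 1) : Nat) : Int) =
          (((k + 1) ^^^ Nat.ldiff (k + 1) ((k + 1) - 1) : Nat) : Int) := rfl
      rw [hland, hxor, ih _ (by have := pvB_stepN (k + 1) (by omega); omega)]
      simp
    · rw [dif_neg (by exact_mod_cast hn), dif_neg hn]
      rfl

-- Bits of n = 2^t*(2m+1) and r = 2^t*(2m)
theorem pv_bitN_low (t m j : Nat) (hj : j < t) : (2 ^ t * (2 * m + 1)).testBit j = false := by
  rw [Nat.testBit_two_pow_mul]; simp [Nat.not_le.mpr hj]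

theorem pv_bitN_t (t m : Nat) : (2 ^ t * (2 * m + 1)).testBit t = true := by
  rw [Nat.testBit_two_pow_mul]; simp [Nat.testBit_zero]

theorem pv_bitR_le (t m j : Nat) (hj : j ≤ t) : (2 ^ t * (2 * m)).testBit j = false := by
  rw [Nat.testBit_two_pow_mul]
  rcases Nat.lt_or_ge j t with h | h
  · simp [Nat.not_le.mpr h]
  · have : j = t := by omega
    subst this
    simp [Nat.testBit_zero]

theorem pv_bit_gt (t m j : Nat) (hj : t < j) :
    (2 ^ t * (2 * m + 1)).testBit j = (2 ^ t * (2 * m)).testBit j := by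
  rw [Nat.testBit_two_pow_mul, Nat.testBit_two_pow_mul]
  obtain ⟨k, hk⟩ : ∃ k, j - t = k + 1 := ⟨j - t - 1, by omega⟩
  rw [hk, Nat.testBit_add_one, Nat.testBit_add_one]
  have e1 : (2 * m + 1) / 2 = m := by omega
  have e2 : (2 * m) / 2 = m := by omega
  rw [e1, e2]

theorem pv_le_guard (t m j : Nat) (hj : t < j) :
    (2 ^ j ≤ 2 ^ t * (2 * m + 1)) ↔ (2 ^ j ≤ 2 ^ t * (2 * m)) := by
  constructor
  · intro h
    have hsplit : 2 ^ j = 2 ^ t * 2 ^ (j - t) := by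
      rw [← pow_add]; congr 1; omega
    rw [hsplit] at h ⊢
    have h1 : 0 < 2 ^ t := Nat.two_pow_pos t
    have h2 : 2 ^ (j - t) ≤ 2 * m + 1 := Nat.le_of_mul_le_mul_left h h1
    obtain ⟨c, hc⟩ : ∃ c, 2 ^ (j - t) = 2 * c := ⟨2 ^ (j - t - 1), by rw [← pow_succ']; congr 1; omega⟩
    have h3 : 2 ^ (j - t) ≤ 2 * m := by omega
    exact Nat.mul_le_mul_left _ h3
  · intro h
    refine le_trans h ?_
    gcongr
    omega

-- scanning A's loop from exponent j up to t yields exactly [2^t] prepended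
theorem pv_scan_low (t m : Nat) : ∀ (k j : Nat), j + k = t →
    pvAN (2 ^ t * (2 * m + 1)) j = 2 ^ t :: pvAN (2 ^ t * (2 * m + 1)) (t + 1) := by
  intro k
  induction k with
  | zero =>
    intro j hj
    have hjt : j = t := by omega
    subst hjt
    rw [pvAN]
    have hg : 2 ^ j ≤ 2 ^ j * (2 * m + 1) := by nlinarith [Nat.two_pow_pos j]
    rw [dif_pos hg, if_pos (pv_bitN_t j m)]
    rfl
  | succ k ih =>
    intro j hj
    rw [pvAN]
    have hle : 2 ^ j ≤ 2 ^ t := Nat.pow_le_pow_right (by omega) (by omega)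
    have hg : 2 ^ j ≤ 2 ^ t * (2 * m + 1) := le_trans hle (by nlinarith [Nat.two_pow_pos t])
    rw [dif_pos hg, if_neg (by simp [pv_bitN_low t m j (by omega)])]
    simpa using ih (j + 1) (by omega)

-- above t, A's loop cannot tell n from n - 2^t
theorem pv_scan_high (t m : Nat) : ∀ (fuel j : Nat), 2 ^ t * (2 * m + 1) + 1 - 2 ^ j ≤ fuel → t < j →
    pvAN (2 ^ t * (2 * m + 1)) j = pvAN (2 ^ t * (2 * m)) j := by
  intro fuel
  induction fuel with
  | zero =>
    intro j hf hj
    have hg : ¬ (2 ^ j ≤ 2 ^ t * (2 * m + 1)) := by omega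
    conv_lhs => rw [pvAN]
    conv_rhs => rw [pvAN]
    rw [dif_neg hg, dif_neg (fun hc => hg ((pv_le_guard t m j hj).mpr hc))]
  | succ f ih =>
    intro j hf hj
    conv_lhs => rw [pvAN]
    conv_rhs => rw [pvAN]
    by_cases hg : 2 ^ j ≤ 2 ^ t * (2 * m + 1)
    · rw [dif_pos hg, dif_pos ((pv_le_guard t m j hj).mp hg), pv_bit_gt t m j hj]
      have hrec : pvAN (2 ^ t * (2 * m + 1)) (j + 1) = pvAN (2 ^ t * (2 * m)) (j + 1) := by
        apply ih
        · have h1 : 0 < 2 ^ j := Nat.two_pow_pos j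
          have h2 : 2 ^ (j + 1) = 2 * 2 ^ j := by ring
          omega
        · omega
      rw [hrec]
    · rw [dif_neg hg, dif_neg (fun hc => hg ((pv_le_guard t m j hj).mpr hc))]

-- A's loop skips the cleared low bits of n - 2^t
theorem pv_scan_zero (t m : Nat) : ∀ (k j : Nat), j + k = t + 1 →
    pvAN (2 ^ t * (2 * m)) j = pvAN (2 ^ t * (2 * m)) (t + 1) := by
  intro k
  induction k with
  | zero =>
    intro j hj
    have : j = t + 1 := by omega
    subst this
    rfl
  | succ k ih =>
    intro j hj
    rw [pvAN]
    by_cases hg : 2 ^ j ≤ 2 ^ t * (2 * m)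
    · rw [dif_pos hg, if_neg (by simp [pv_bitR_le t m j (by omega)])]
      simpa using ih (j + 1) (by omega)
    · rw [dif_neg hg]
      rw [pvAN]
      have : ¬ (2 ^ (t + 1) ≤ 2 ^ t * (2 * m)) := by
        intro hc
        exact hg (le_trans (Nat.pow_le_pow_right (by omega) (by omega)) hc)
      rw [dif_neg this]

theorem pv_mainN : ∀ n : Nat, pvAN n 0 = pvBN n := by
  intro n
  induction n using Nat.strong_induction_on with
  | _ n ih =>
    by_cases hn : n = 0
    · subst hn
      rw [pvAN, pvBN]
      norm_num
    · obtain ⟨t, m', hm, heq⟩ := Nat.exists_eq_two_pow_mul_odd (n := n) hn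
      obtain ⟨m, rfl⟩ := hm
      subst heq
      rw [pvBN, dif_pos (by positivity), pv_ldiff, pv_xor]
      rw [pv_scan_low t m t 0 (by omega)]
      rw [pv_scan_high t m (2 ^ t * (2 * m + 1) + 1) (t + 1) (Nat.sub_le _ _) (by omega)]
      rw [← pv_scan_zero t m (t + 1) 0 (by omega)]
      congr 1
      apply ih
      have h1 : 0 < 2 ^ t := Nat.two_pow_pos t
      nlinarith

theorem pv_final (x : Int) : pvA_loop x 1 (by omega) = pvB_loop x := by
  by_cases hx : 0 < x
  · have hx' : x = ((x.toNat : Nat) : Int) := by omega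
    have hA := pv_bridgeA (x.toNat + 1) x.toNat 0 1 x (by omega) (by omega) (by norm_num) hx'
    have hB := pv_bridgeB x.toNat x.toNat (le_refl _)
    rw [← hx'] at hB
    rw [hA, hB, pv_mainN]
  · rw [pvA_loop, pvB_loop, dif_neg (by omega), dif_neg hx]

-- ===== VERDICT (by name: the statement is the Claim_ definition above) =====
theorem get_all_powers_of_two_spec : Claim_equal_get_all_powers_of_two := by
  intro x _
  exact pv_final x
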